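-- pv_equiv track=rewrite | github.com/hamret/acc_analysis | modules/sync_calibrator.py | generate_frame_map
-- ===== SOURCE A (Python) =====
-- def generate_frame_map(fps, n_video, n_tel, sync_offset):
--     frame_map = []
--
--     for i in range(n_video):
--         tel_idx = i + sync_offset
--         if 0 <= tel_idx < n_tel:
--             frame_map.append(tel_idx)
--         else:
--             frame_map.append(None)
--
--     return frame_map
-- ===== SOURCE B (Python) =====
-- def generate_frame_map(fps, n_video, n_tel, sync_offset):
--     # Closed-form window arithmetic instead of a per-frame loop with a range check.
--     start = min(max(-sync_offset, 0), n_video)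
--     end = max(start, min(max(n_tel - sync_offset, 0), n_video))
--     return ([None] * start
--             + list(range(start + sync_offset, end + sync_offset))
--             + [None] * (n_video - end))
-- ===== Notes on version B (the rewrite author's own statement) =====
-- stated objective: simpler
-- what changed: Replaces the per-index loop with a per-element range test by closed-form clamping of the mapped window's boundaries and concatenation of two None-padding segments around a single range().
import Mathlib
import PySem

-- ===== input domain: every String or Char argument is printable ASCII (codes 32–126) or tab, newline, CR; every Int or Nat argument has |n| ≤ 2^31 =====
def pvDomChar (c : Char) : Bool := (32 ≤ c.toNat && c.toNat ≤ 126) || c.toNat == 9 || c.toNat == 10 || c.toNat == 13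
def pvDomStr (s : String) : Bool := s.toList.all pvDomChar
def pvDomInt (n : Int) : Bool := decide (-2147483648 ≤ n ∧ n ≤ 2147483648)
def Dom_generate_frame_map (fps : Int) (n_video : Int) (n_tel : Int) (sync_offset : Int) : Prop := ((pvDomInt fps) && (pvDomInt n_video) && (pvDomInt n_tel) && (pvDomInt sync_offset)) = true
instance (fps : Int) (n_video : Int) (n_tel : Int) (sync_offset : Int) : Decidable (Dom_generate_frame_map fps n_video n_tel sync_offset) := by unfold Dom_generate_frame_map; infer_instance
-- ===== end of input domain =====

-- B replaces A's per-index loop (range check on every frame) by closed-form clamped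
-- window boundaries plus segment concatenation; objective: simpler.


-- ===== PORT A =====
def generate_frame_map (fps : Int) (n_video : Int) (n_tel : Int) (sync_offset : Int) : List (Option Int) :=
  (PySem.List.pyRange 0 n_video 1).foldl
    (fun frame_map i =>
      let tel_idx := i + sync_offset
      if 0 ≤ tel_idx ∧ tel_idx < n_tel then frame_map ++ [some tel_idx]
      else frame_map ++ [none]) []

-- ===== PORT B =====
def generate_frame_map_alt (fps : Int) (n_video : Int) (n_tel : Int) (sync_offset : Int) : List (Option Int) :=
  let start := min (max (-sync_offset) 0) n_video
  let stop := max start (min (max (n_tel - sync_offset) 0) n_video)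
  List.replicate start.toNat none
    ++ (PySem.List.pyRange (start + sync_offset) (stop + sync_offset) 1).map some
    ++ List.replicate (n_video - stop).toNat none

-- ===== PRECONDITION & SPEC =====
def Spec_generate_frame_map (fps : Int) (n_video : Int) (n_tel : Int) (sync_offset : Int) (out : List (Option Int)) : Prop := out = generate_frame_map_alt fps n_video n_tel sync_offset
instance (fps : Int) (n_video : Int) (n_tel : Int) (sync_offset : Int) (out : List (Option Int)) : Decidable (Spec_generate_frame_map fps n_video n_tel sync_offset out) := by unfold Spec_generate_frame_map; infer_instance

-- ===== CLAIM (what is proved, stated in full; the proofs are below) =====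
def Claim_equal_generate_frame_map : Prop := ∀ (fps : Int) (n_video : Int) (n_tel : Int) (sync_offset : Int), Dom_generate_frame_map fps n_video n_tel sync_offset → Spec_generate_frame_map fps n_video n_tel sync_offset (generate_frame_map fps n_video n_tel sync_offset)

-- ===== LEMMAS AND PROOFS =====

-- A segment of pyRange on which g is constantly none maps to a replicate.
theorem map_seg_none (g : Int → Option Int) (a b : Int)
    (h : ∀ x, a ≤ x → x < b → g x = none) :
    (PySem.List.pyRange a b 1).map g = List.replicate (b - a).toNat none := by
  rw [List.eq_replicate_iff]
  constructor
  · simp [PySem.List.length_pyRange_one]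
  · intro y hy
    obtain ⟨x, hx, rfl⟩ := List.mem_map.mp hy
    obtain ⟨h1, h2⟩ := (PySem.List.mem_pyRange_one).mp hx
    exact h x h1 h2

-- The middle segment: g returns some (x + off) there.
theorem map_seg_some (g : Int → Option Int) (a b off : Int)
    (h : ∀ x, a ≤ x → x < b → g x = some (x + off)) :
    (PySem.List.pyRange a b 1).map g
      = (PySem.List.pyRange (a + off) (b + off) 1).map some := by
  rw [PySem.List.pyRange_one a b, PySem.List.pyRange_one (a + off) (b + off)]
  have hlen : (b + off - (a + off)).toNat = (b - a).toNat := by omega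
  rw [hlen, List.map_map, List.map_map]
  apply List.map_congr_left
  intro k hk
  simp only [List.mem_range] at hk
  have h1 : a ≤ a + (k : Int) := by omega
  have h2 : a + (k : Int) < b := by omega
  simp only [Function.comp]
  rw [h _ h1 h2]
  congr 1
  ring

theorem generate_frame_map_eq_map (fps n_video n_tel sync_offset : Int) :
    generate_frame_map fps n_video n_tel sync_offset
      = (PySem.List.pyRange 0 n_video 1).map
          (fun i => if 0 ≤ i + sync_offset ∧ i + sync_offset < n_tel
                    then some (i + sync_offset) else none) := by
  unfold generate_frame_map
  rw [PySem.List.foldl_congr_mem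
      (g := fun acc i => acc ++ [if 0 ≤ i + sync_offset ∧ i + sync_offset < n_tel
                                 then some (i + sync_offset) else none])]
  · rw [PySem.List.foldl_append_singleton_eq_map]
    simp
  · intro acc x _
    by_cases h : 0 ≤ x + sync_offset ∧ x + sync_offset < n_tel <;> simp [h]

-- ===== VERDICT (by name: the statement is the Claim_ definition above) =====
theorem generate_frame_map_spec : Claim_equal_generate_frame_map := by
  intro fps n nt off _
  unfold Spec_generate_frame_map
  rw [generate_frame_map_eq_map]
  simp only [generate_frame_map_alt]
  set g : Int → Option Int :=
    fun i => if 0 ≤ i + off ∧ i + off < nt then some (i + off) else none with hg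
  set s := min (max (-off) 0) n with hs
  set e := max s (min (max (nt - off) 0) n) with he
  by_cases hn : n ≤ 0
  · have hsn : s = n := by omega
    have hen : e = n := by omega
    rw [PySem.List.pyRange_one_eq_nil hn, PySem.List.pyRange_one_eq_nil (by omega)]
    simp [hsn, hen, List.replicate_eq_nil_iff]
    omega
  · have hbounds : 0 ≤ s ∧ s ≤ e ∧ e ≤ n := by omega
    rw [PySem.List.pyRange_one_append 0 s n (by omega) (by omega), List.map_append,
        PySem.List.pyRange_one_append s e n (by omega) (by omega), List.map_append]
    rw [map_seg_none g 0 s (fun x h1 h2 => by simp only [hg]; rw [if_neg]; omega),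
        map_seg_none g e n (fun x h1 h2 => by simp only [hg]; rw [if_neg]; omega),
        map_seg_some g s e off (fun x h1 h2 => by simp only [hg]; rw [if_pos]; omega)]
    simp only [Int.sub_zero, List.append_assoc]
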